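-- pv_equiv track=rewrite | github.com/Umeno-koudai/fibonacci-checker | fibonacci_checker.py | is_fibonacci_sequence
-- ===== SOURCE A (Python) =====
-- def is_fibonacci_sequence(sequence):
--     """
--     与えられた数列がフィボナッチ数列かどうかを判定する関数
--
--     Args:
--         sequence (list): 判定する数列
--
--     Returns:
--         bool: フィボナッチ数列の場合はTrue、そうでない場合はFalse
--     """
--     # 数列が2つ未満の場合はFalse
--     if len(sequence) < 2:
--         return False
--
--     # 最初の2つの数が0と1でない場合はFalse
--     if sequence[0] != 0 or sequence[1] != 1:
--         return False
--
--     # 3番目以降の数が前の2つの数の和になっているかチェック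
--     for i in range(2, len(sequence)):
--         if sequence[i] != sequence[i-1] + sequence[i-2]:
--             return False
--
--     return True
-- ===== SOURCE B (Python) =====
-- def is_fibonacci_sequence(sequence):
--     """Construct the canonical Fibonacci prefix of the same length, then compare once."""
--     if len(sequence) < 2:
--         return False
--     expected = [0, 1]
--     while len(expected) < len(sequence):
--         expected.append(expected[-1] + expected[-2])
--     return sequence == expected
-- ===== Notes on version B (the rewrite author's own statement) =====
-- stated objective: simpler
-- what changed: B builds the canonical Fibonacci list of the input's length and returns one whole-list equality, instead of A's inline guards plus an index loop checking the recurrence element by element.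
import Mathlib
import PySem

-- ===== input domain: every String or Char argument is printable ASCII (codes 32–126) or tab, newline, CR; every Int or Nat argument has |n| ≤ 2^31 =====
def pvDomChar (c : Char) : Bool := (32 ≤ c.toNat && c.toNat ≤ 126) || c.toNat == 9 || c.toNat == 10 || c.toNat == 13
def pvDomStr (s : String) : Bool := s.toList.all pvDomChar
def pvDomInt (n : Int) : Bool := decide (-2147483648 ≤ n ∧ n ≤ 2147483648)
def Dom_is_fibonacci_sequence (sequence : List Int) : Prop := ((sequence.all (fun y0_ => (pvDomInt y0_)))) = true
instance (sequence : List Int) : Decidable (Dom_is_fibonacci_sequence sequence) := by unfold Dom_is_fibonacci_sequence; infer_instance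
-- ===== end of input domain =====

-- B replaces A's guards-plus-recurrence index loop by building the canonical Fibonacci
-- list of the input's length and comparing once (objective: simpler decomposition).

-- ===== PORT A =====
-- indices 0, 1 and i, i-1, i-2 for i in range(2, len) are always in range, so
-- pyGetD with default 0 is exact here (Python never raises on these accesses).
def is_fibonacci_sequence (sequence : List Int) : Bool :=
  if sequence.length < 2 then false
  else if PySem.List.pyGetD sequence 0 0 != 0 || PySem.List.pyGetD sequence 1 0 != 1 then false
  else (PySem.List.pyRange 2 sequence.length 1).all (fun i =>
    PySem.List.pyGetD sequence i 0 ==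
      PySem.List.pyGetD sequence (i - 1) 0 + PySem.List.pyGetD sequence (i - 2) 0)

-- ===== PORT B =====
-- the while-loop of Source B runs exactly (len sequence - 2) times; expected[-1]/[-2]
-- are always in range (expected starts with two elements), so pyGetD is exact.
def pvExtendFib : Nat → List Int → List Int
  | 0, e => e
  | n + 1, e =>
      pvExtendFib n (e ++ [PySem.List.pyGetD e (-1) 0 + PySem.List.pyGetD e (-2) 0])

def is_fibonacci_sequence_alt (sequence : List Int) : Bool :=
  if sequence.length < 2 then false
  else sequence == pvExtendFib (sequence.length - 2) [0, 1]

-- ===== PRECONDITION & SPEC =====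
def Spec_is_fibonacci_sequence (sequence : List Int) (out : Bool) : Prop := out = is_fibonacci_sequence_alt sequence
instance (sequence : List Int) (out : Bool) : Decidable (Spec_is_fibonacci_sequence sequence out) := by unfold Spec_is_fibonacci_sequence; infer_instance

-- ===== CLAIM (what is proved, stated in full; the proofs are below) =====
def Claim_equal_is_fibonacci_sequence : Prop := ∀ (sequence : List Int), Dom_is_fibonacci_sequence sequence → Spec_is_fibonacci_sequence sequence (is_fibonacci_sequence sequence)

-- ===== LEMMAS AND PROOFS =====

/-- The mathematical Fibonacci values both programs are about. -/
def pvFib : Nat → Int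
  | 0 => 0
  | 1 => 1
  | n + 2 => pvFib n + pvFib (n + 1)

lemma pvExtendFib_fib (n m : Nat) :
    pvExtendFib n ((List.range (m + 2)).map pvFib) = (List.range (n + m + 2)).map pvFib := by
  induction n generalizing m with
  | zero => simp [pvExtendFib]
  | succ k ih =>
      have hlen : ((List.range (m + 2)).map pvFib).length = m + 2 := by simp
      have h1 : PySem.List.pyGetD ((List.range (m + 2)).map pvFib) (-1) 0 = pvFib (m + 1) := by
        rw [PySem.List.pyGetD_neg_ofNat _ 1 0 (by omega) (by omega)]
        simp [hlen]
      have h2 : PySem.List.pyGetD ((List.range (m + 2)).map pvFib) (-2) 0 = pvFib m := by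
        rw [PySem.List.pyGetD_neg_ofNat _ 2 0 (by omega) (by omega)]
        simp [hlen]
      have happ : (List.range (m + 2)).map pvFib ++ [pvFib (m + 1) + pvFib m]
          = (List.range (m + 1 + 2)).map pvFib := by
        have hr : (List.range (m + 1 + 2)).map pvFib
            = (List.range (m + 2)).map pvFib ++ [pvFib (m + 2)] := by
          rw [show m + 1 + 2 = (m + 2) + 1 from by omega]
          conv_lhs => rw [List.range_succ]
          simp
        rw [hr, show pvFib (m + 2) = pvFib m + pvFib (m + 1) from rfl,
            add_comm (pvFib m)]
      calc pvExtendFib (k + 1) ((List.range (m + 2)).map pvFib)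
          = pvExtendFib k ((List.range (m + 1 + 2)).map pvFib) := by
            rw [pvExtendFib, h1, h2, happ]
        _ = (List.range (k + (m + 1) + 2)).map pvFib := ih (m + 1)
        _ = (List.range (k + 1 + m + 2)).map pvFib := by ring_nf

lemma pvExtendFib_canon (n : Nat) (h : 2 ≤ n) :
    pvExtendFib (n - 2) [0, 1] = (List.range n).map pvFib := by
  have h0 : ([0, 1] : List Int) = (List.range (0 + 2)).map pvFib := by decide
  rw [h0, pvExtendFib_fib, show n - 2 + 0 + 2 = n from by omega]

lemma pvA_true_iff (s : List Int) (h2 : ¬ s.length < 2) :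
    is_fibonacci_sequence s = true ↔ s = (List.range s.length).map pvFib := by
  have hg0 : PySem.List.pyGetD s 0 0 = s.getD 0 0 := by
    simpa using PySem.List.pyGetD_natCast s 0 0
  have hg1 : PySem.List.pyGetD s 1 0 = s.getD 1 0 := by
    simpa using PySem.List.pyGetD_natCast s 1 0
  have hAiff : is_fibonacci_sequence s = true ↔
      (s.getD 0 0 = 0 ∧ s.getD 1 0 = 1 ∧
        ∀ k : Nat, 2 ≤ k → k < s.length →
          s.getD k 0 = s.getD (k - 1) 0 + s.getD (k - 2) 0) := by
    unfold is_fibonacci_sequence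
    rw [if_neg h2]
    by_cases hg : PySem.List.pyGetD s 0 0 != 0 || PySem.List.pyGetD s 1 0 != 1
    · rw [if_pos hg]
      simp only [hg0, hg1, Bool.or_eq_true, bne_iff_ne, ne_eq] at hg
      constructor
      · intro h; simp at h
      · intro h
        rcases hg with hg | hg
        · exact absurd h.1 hg
        · exact absurd h.2.1 hg
    · rw [if_neg hg]
      simp only [hg0, hg1, Bool.or_eq_true, bne_iff_ne, ne_eq, not_or, not_not] at hg
      rw [List.all_eq_true]
      constructor
      · intro h
        refine ⟨hg.1, hg.2, ?_⟩
        intro k hk2 hklt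
        have hmem : (k : Int) ∈ PySem.List.pyRange 2 s.length 1 := by
          rw [PySem.List.mem_pyRange_one]
          constructor <;> [exact_mod_cast hk2; exact_mod_cast hklt]
        have hb := h _ hmem
        rw [beq_iff_eq,
            show ((k : Int) - 1) = ((k - 1 : Nat) : Int) from by omega,
            show ((k : Int) - 2) = ((k - 2 : Nat) : Int) from by omega,
            PySem.List.pyGetD_natCast, PySem.List.pyGetD_natCast,
            PySem.List.pyGetD_natCast] at hb
        exact hb
      · rintro ⟨_, _, hrec⟩ i hi
        rw [PySem.List.mem_pyRange_one] at hi
        obtain ⟨k, rfl, hk2, hklt⟩ : ∃ k : Nat, i = (k : Int) ∧ 2 ≤ k ∧ k < s.length :=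
          ⟨i.toNat, by omega, by omega, by omega⟩
        rw [beq_iff_eq,
            show ((k : Int) - 1) = ((k - 1 : Nat) : Int) from by omega,
            show ((k : Int) - 2) = ((k - 2 : Nat) : Int) from by omega,
            PySem.List.pyGetD_natCast, PySem.List.pyGetD_natCast,
            PySem.List.pyGetD_natCast]
        exact hrec k hk2 hklt
  rw [hAiff]
  constructor
  · rintro ⟨h0, h1, hrec⟩
    have key : ∀ k : Nat, k < s.length → s.getD k 0 = pvFib k := by
      intro k
      induction k using Nat.strong_induction_on with
      | _ k ih =>
        intro hk
        match k, ih with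
        | 0, _ => simpa [pvFib] using h0
        | 1, _ => simpa [pvFib] using h1
        | (j + 2), ih =>
          have hr := hrec (j + 2) (by omega) hk
          have e1 := ih (j + 1) (by omega) (by omega)
          have e2 := ih j (by omega) (by omega)
          simp only [show j + 2 - 1 = j + 1 from rfl, show j + 2 - 2 = j from rfl] at hr
          rw [e1, e2] at hr
          rw [hr]
          simp [pvFib, add_comm]
    apply List.ext_getElem (by simp)
    intro k hk1 hk2
    have hv := key k hk1
    rw [List.getD_eq_getElem s 0 hk1] at hv
    rw [hv]
    simp
  · intro hs
    have hget : ∀ k : Nat, k < s.length → s.getD k 0 = pvFib k := by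
      intro k hk
      have hk' : k < ((List.range s.length).map pvFib).length := by simpa using hk
      calc s.getD k 0 = ((List.range s.length).map pvFib).getD k 0 := by
            conv_lhs => rw [hs]
        _ = pvFib k := by rw [List.getD_eq_getElem _ 0 hk']; simp
    refine ⟨?_, ?_, ?_⟩
    · simpa [pvFib] using hget 0 (by omega)
    · simpa [pvFib] using hget 1 (by omega)
    · intro k hk2 hklt
      rw [hget k hklt, hget (k - 1) (by omega), hget (k - 2) (by omega)]
      obtain ⟨j, rfl⟩ : ∃ j, k = j + 2 := ⟨k - 2, by omega⟩
      simp [pvFib, add_comm]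

lemma pvB_true_iff (s : List Int) (h2 : ¬ s.length < 2) :
    is_fibonacci_sequence_alt s = true ↔ s = (List.range s.length).map pvFib := by
  unfold is_fibonacci_sequence_alt
  rw [if_neg h2, pvExtendFib_canon s.length (by omega)]
  simp

-- ===== VERDICT (by name: the statement is the Claim_ definition above) =====
theorem is_fibonacci_sequence_spec : Claim_equal_is_fibonacci_sequence := by
  intro s _
  unfold Spec_is_fibonacci_sequence
  by_cases h2 : s.length < 2
  · unfold is_fibonacci_sequence is_fibonacci_sequence_alt
    rw [if_pos h2, if_pos h2]
  · rw [Bool.eq_iff_iff, pvA_true_iff s h2, pvB_true_iff s h2]
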